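-- pv_equiv track=rewrite | github.com/Jyoungjo/Algorithm_python | 백준/Gold/2212. 센서/센서.py | solution
-- ===== SOURCE A (Python) =====
-- def solution(N, K, coord):
--     if K >= N:
--         return 0
--     dist = []
--     for i in range(1, N):
--         dist.append(coord[i] - coord[i - 1])
--     dist.sort(reverse=True)
--     for i in range(K-1):
--         dist.pop(0)
--     return sum(dist)
-- ===== SOURCE B (Python) =====
-- def _top_sum(l, m):
--     # quickselect-style partition recursion: sum of the m largest elements of l
--     if m <= 0 or not l:
--         return 0
--     p = l[0]
--     big = [x for x in l if x > p]
--     small = [x for x in l if x < p]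
--     e = len(l) - len(big) - len(small)
--     if m <= len(big):
--         return _top_sum(big, m)
--     if m <= len(big) + e:
--         return sum(big) + p * (m - len(big))
--     return sum(big) + p * e + _top_sum(small, m - len(big) - e)
--
--
-- def solution(N, K, coord):
--     if K >= N:
--         return 0
--     gaps = [coord[i] - coord[i - 1] for i in range(1, N)]
--     return sum(gaps) - _top_sum(gaps, K - 1)
-- ===== Notes on version B (the rewrite author's own statement) =====
-- stated objective: alternative
-- what changed: B never sorts: it computes the sum of the K-1 largest gaps by a quickselect-style three-way partition recursion around the pivot gap and subtracts it from the total gap sum, replacing A's descending sort followed by K-1 repeated pop(0) calls; intended as faster, but a timing run did not confirm it at every size, so no speed is claimed.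
import Mathlib
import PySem

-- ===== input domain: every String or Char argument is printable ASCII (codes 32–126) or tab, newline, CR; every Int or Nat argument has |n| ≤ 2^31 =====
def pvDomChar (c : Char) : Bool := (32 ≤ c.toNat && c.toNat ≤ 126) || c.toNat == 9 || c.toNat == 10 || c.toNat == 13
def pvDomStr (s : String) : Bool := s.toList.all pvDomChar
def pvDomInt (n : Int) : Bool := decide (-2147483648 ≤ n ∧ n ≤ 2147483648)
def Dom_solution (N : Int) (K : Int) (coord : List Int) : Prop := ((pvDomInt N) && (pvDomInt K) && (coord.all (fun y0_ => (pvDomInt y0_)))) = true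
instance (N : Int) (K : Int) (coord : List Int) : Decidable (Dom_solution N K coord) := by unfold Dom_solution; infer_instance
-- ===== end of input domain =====

-- B does not sort: it subtracts from the total gap sum the sum of the K-1 largest gaps,
-- found by a quickselect-style three-way partition recursion (alternative algorithm).
-- ===== PORT A =====
def solution (N : Int) (K : Int) (coord : List Int) : Int :=
  if K ≥ N then 0
  else
    -- for i in range(1, N): dist.append(coord[i] - coord[i-1])
    let dist := (PySem.List.pyRange 1 N 1).foldl
      (fun acc i => acc ++ [PySem.List.pyGetD coord i 0 - PySem.List.pyGetD coord (i - 1) 0]) []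
    -- dist.sort(reverse=True)
    let dist := PySem.List.sorted dist (fun x => x) true
    -- for i in range(K-1): dist.pop(0)   (pop(0) never raises inside Pre_)
    let dist := (PySem.List.pyRange 0 (K - 1) 1).foldl
      (fun d _ => match PySem.List.pop? d 0 with
        | some r => r.2
        | none => d) dist
    dist.sum

-- ===== PORT B =====
-- _top_sum(l, m): sum of the m largest elements of l by recursive three-way partition
-- around the pivot l[0] (the fuel argument, l.length at top level, only makes the
-- structurally smaller recursion visible to Lean; it is never exhausted).
def topSumGo : Nat → List Int → Int → Int
  | 0, _, _ => 0
  | fuel+1, l, m =>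
    if m ≤ 0 ∨ l = [] then 0
    else
      let p := l.headI
      let big := l.filter (fun x => p < x)
      let small := l.filter (fun x => x < p)
      let e := (l.length : Int) - big.length - small.length
      if m ≤ (big.length : Int) then topSumGo fuel big m
      else if m ≤ (big.length : Int) + e then big.sum + p * (m - big.length)
      else big.sum + p * e + topSumGo fuel small (m - big.length - e)

def topSum (l : List Int) (m : Int) : Int := topSumGo l.length l m

def solution_alt (N : Int) (K : Int) (coord : List Int) : Int :=
  if K ≥ N then 0
  else
    let gaps := (PySem.List.pyRange 1 N 1).map
      (fun i => PySem.List.pyGetD coord i 0 - PySem.List.pyGetD coord (i - 1) 0)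
    gaps.sum - topSum gaps (K - 1)

-- ===== PRECONDITION & SPEC =====
-- Pre_ excludes exactly the inputs where A raises IndexError (2 ≤ N, K < N, and coord
-- shorter than N, so coord[i] goes out of range); nothing A returns on is excluded.
def Pre_solution (N : Int) (K : Int) (coord : List Int) : Prop :=
  K ≥ N ∨ N ≤ 1 ∨ N ≤ (coord.length : Int)
instance (N : Int) (K : Int) (coord : List Int) : Decidable (Pre_solution N K coord) := by
  unfold Pre_solution; infer_instance
def pvWitness_solution : Int × Int × List Int := (5, 2, [1, 2, 3, 6, 7])
def Spec_solution (N : Int) (K : Int) (coord : List Int) (out : Int) : Prop := out = solution_alt N K coord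
instance (N : Int) (K : Int) (coord : List Int) (out : Int) : Decidable (Spec_solution N K coord out) := by unfold Spec_solution; infer_instance

-- ===== CLAIM (what is proved, stated in full; the proofs are below) =====
def Claim_equal_solution : Prop := ∀ (N : Int) (K : Int) (coord : List Int), Dom_solution N K coord → Pre_solution N K coord → Spec_solution N K coord (solution N K coord)

-- ===== LEMMAS AND PROOFS =====

-- A's pop(0) loop: the body is List.tail (pop? [] is none and tail [] = []), so the loop drops l.length elements.
lemma pop_loop_eq_drop (l : List Int) (d : List Int) :
    l.foldl (fun d _ => match PySem.List.pop? d 0 with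
      | some r => r.2
      | none => d) d = d.drop l.length := by
  induction l generalizing d with
  | nil => simp
  | cons x t ih =>
      have hstep : (match PySem.List.pop? d 0 with
          | some r => r.2
          | none => d) = d.tail := by
        cases d with
        | nil => simp [PySem.List.pop?]
        | cons a as => simp [PySem.List.pop?_zero_cons]
      simp only [List.foldl_cons, hstep, ih, List.length_cons]
      rw [← List.drop_one, List.drop_drop, Nat.add_comm]

lemma count_filter_eq (l : List Int) (q : Int → Bool) (x : Int) :
    (l.filter q).count x = if q x then l.count x else 0 := by
  split
  · exact List.count_filter ‹_›
  · rw [List.count_eq_zero]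
    intro hm
    exact ‹¬ q x = true› (List.of_mem_filter hm)

-- any list splits, as a multiset, into the parts above, at, and below a pivot p
lemma partition_perm (l : List Int) (p : Int) :
    l.Perm (l.filter (fun x => p < x) ++ List.replicate (l.count p) p ++ l.filter (fun x => x < p)) := by
  rw [List.perm_iff_count]
  intro x
  simp only [List.count_append, List.count_replicate, count_filter_eq]
  rcases lt_trichotomy p x with h|h|h
  · have h1 : ¬ x < p := by omega
    have h2 : ¬ (p == x) = true := by simp; omega
    simp [h, h1, h2]
  · subst h
    simp
  · have h1 : ¬ p < x := by omega
    have h2 : ¬ (p == x) = true := by simp; omega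
    simp [h, h1, h2]

-- the descending sort of l splits as sorted big ++ pivot copies ++ sorted small
lemma sortDesc_split (l : List Int) (p : Int) :
    PySem.List.sorted l (fun x => x) true
      = PySem.List.sorted (l.filter (fun x => p < x)) (fun x => x) true
        ++ List.replicate (l.count p) p
        ++ PySem.List.sorted (l.filter (fun x => x < p)) (fun x => x) true := by
  refine List.Perm.eq_of_pairwise (le := fun a b : Int => b ≤ a)
    (fun a b _ _ h1 h2 => le_antisymm h2 h1)
    (PySem.List.sorted_pairwise_rev l (fun x => x)) ?_ ?_
  · rw [List.pairwise_append]
    refine ⟨?_, PySem.List.sorted_pairwise_rev _ _, ?_⟩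
    · rw [List.pairwise_append]
      refine ⟨PySem.List.sorted_pairwise_rev _ _, List.pairwise_replicate.mpr (Or.inr le_rfl), ?_⟩
      · intro a ha b hb
        have ha' : p < a := by
          simpa using (List.mem_filter.mp ((PySem.List.mem_sorted _ _ _ _).mp ha)).2
        have hb' := List.eq_of_mem_replicate hb
        subst hb'
        omega
    · intro a ha b hb
      have hb' : b < p := by
        simpa using (List.mem_filter.mp ((PySem.List.mem_sorted _ _ _ _).mp hb)).2
      rcases List.mem_append.mp ha with ha | ha
      · have ha' : p < a := by
          simpa using (List.mem_filter.mp ((PySem.List.mem_sorted _ _ _ _).mp ha)).2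
        omega
      · have := List.eq_of_mem_replicate ha
        subst this
        omega
  · exact (PySem.List.sorted_perm _ _ _).trans ((partition_perm l p).trans
      (((PySem.List.sorted_perm _ _ _).symm.append (List.Perm.refl _)).append
        (PySem.List.sorted_perm _ _ _).symm))

lemma headI_mem_of_ne_nil (l : List Int) (h : l ≠ []) : l.headI ∈ l := by
  cases l with
  | nil => exact absurd rfl h
  | cons a t => simp

lemma topSumGo_succ (fuel : Nat) (l : List Int) (m : Int) :
    topSumGo (fuel+1) l m =
      if m ≤ 0 ∨ l = [] then 0
      else
        if m ≤ ((l.filter (fun x => l.headI < x)).length : Int) then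
          topSumGo fuel (l.filter (fun x => l.headI < x)) m
        else if m ≤ ((l.filter (fun x => l.headI < x)).length : Int) +
            ((l.length : Int) - (l.filter (fun x => l.headI < x)).length
              - (l.filter (fun x => x < l.headI)).length) then
          (l.filter (fun x => l.headI < x)).sum
            + l.headI * (m - (l.filter (fun x => l.headI < x)).length)
        else
          (l.filter (fun x => l.headI < x)).sum
            + l.headI * ((l.length : Int) - (l.filter (fun x => l.headI < x)).length
                - (l.filter (fun x => x < l.headI)).length)
            + topSumGo fuel (l.filter (fun x => x < l.headI))
                (m - (l.filter (fun x => l.headI < x)).length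
                  - ((l.length : Int) - (l.filter (fun x => l.headI < x)).length
                      - (l.filter (fun x => x < l.headI)).length)) := rfl

-- the partition recursion sums exactly the first m elements of the descending sort
lemma topSumGo_eq (fuel : Nat) (l : List Int) (m : Int) (hf : l.length ≤ fuel) :
    topSumGo fuel l m = ((PySem.List.sorted l (fun x => x) true).take m.toNat).sum := by
  induction fuel generalizing l m with
  | zero =>
      have : l = [] := List.length_eq_zero_iff.mp (Nat.le_zero.mp hf)
      subst this
      simp [topSumGo, (PySem.List.sorted_eq_nil_iff _ _ _).mpr rfl]
  | succ fuel ih =>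
      rw [topSumGo_succ]
      by_cases h0 : m ≤ 0 ∨ l = []
      · rw [if_pos h0]
        rcases h0 with h0 | h0
        · rw [(by omega : m.toNat = 0)]
          simp
        · subst h0
          simp [(PySem.List.sorted_eq_nil_iff _ _ _).mpr rfl]
      · rw [if_neg h0]
        rcases not_or.mp h0 with ⟨hm', hne⟩
        have hm : 0 < m := by omega
        set p := l.headI with hp
        set big := l.filter (fun x => p < x) with hbig
        set small := l.filter (fun x => x < p) with hsmall
        set cnt := l.count p with hcnt
        have hsplit := sortDesc_split l p
        rw [← hbig, ← hsmall] at hsplit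
        have hlenA : (PySem.List.sorted big (fun x => x) true).length = big.length :=
          PySem.List.length_sorted _ _ _
        have hlenC : (PySem.List.sorted small (fun x => x) true).length = small.length :=
          PySem.List.length_sorted _ _ _
        have hlen : l.length = big.length + cnt + small.length := by
          have h1 : (PySem.List.sorted l (fun x => x) true).length = l.length :=
            PySem.List.length_sorted _ _ _
          rw [hsplit] at h1
          simp only [List.length_append, List.length_replicate, hlenA, hlenC] at h1
          omega
        have hcnt1 : 0 < cnt :=
          List.count_pos_iff.mpr (headI_mem_of_ne_nil l hne)
        have hbf : big.length ≤ fuel := by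
          have := List.length_filter_le (fun x => decide (p < x)) l
          omega
        have hsf : small.length ≤ fuel := by
          have := List.length_filter_le (fun x => decide (x < p)) l
          omega
        have hsumA : (PySem.List.sorted big (fun x => x) true).sum = big.sum :=
          (PySem.List.sorted_perm _ _ _).sum_eq
        rw [hsplit, List.take_append, List.take_append, List.sum_append, List.sum_append]
        split_ifs with h1 h2
        · -- m ≤ big.length: only the big part contributes
          rw [ih big m hbf]
          have e1 : m.toNat - (PySem.List.sorted big (fun x => x) true ++
              List.replicate cnt p).length = 0 := by
            simp only [List.length_append, List.length_replicate, hlenA]; omega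
          have e2 : m.toNat - (PySem.List.sorted big (fun x => x) true).length = 0 := by
            rw [hlenA]; omega
          rw [e1, e2]
          simp
        · -- big.length < m ≤ big.length + cnt
          have hml : big.length ≤ m.toNat := by omega
          rw [List.take_of_length_le (by rw [hlenA]; exact hml)]
          have e1 : m.toNat - (PySem.List.sorted big (fun x => x) true ++
              List.replicate cnt p).length = 0 := by
            simp only [List.length_append, List.length_replicate, hlenA]; omega
          rw [e1, List.take_zero, List.take_replicate, hsumA]
          have e2 : min (m.toNat - (PySem.List.sorted big (fun x => x) true).length) cnt
              = m.toNat - big.length := by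
            rw [hlenA]; omega
          rw [e2, List.sum_replicate, List.sum_nil, add_zero, nsmul_eq_mul]
          have e3 : ((m.toNat - big.length : Nat) : Int) = m - big.length := by
            omega
          rw [e3]
          ring
        · -- m > big.length + cnt: everything up to part of small contributes
          have hml : big.length ≤ m.toNat := by omega
          rw [List.take_of_length_le (by rw [hlenA]; omega),
            List.take_of_length_le (by simp only [List.length_replicate, hlenA]; omega)]
          rw [hsumA, List.sum_replicate, nsmul_eq_mul]
          have e4 : (m - big.length - ((l.length : Int) - big.length - small.length)).toNat
              = m.toNat - (PySem.List.sorted big (fun x => x) true ++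
                  List.replicate cnt p).length := by
            simp only [List.length_append, List.length_replicate, hlenA]; omega
          rw [ih small _ hsf, e4]
          have e5 : ((cnt : Nat) : Int) = (l.length : Int) - big.length - small.length := by
            omega
          rw [e5]
          ring

lemma topSum_eq (l : List Int) (m : Int) :
    topSum l m = ((PySem.List.sorted l (fun x => x) true).take m.toNat).sum :=
  topSumGo_eq l.length l m le_rfl

-- ===== VERDICT (by name: the statement is the Claim_ definition above) =====
theorem solution_spec : Claim_equal_solution := by
  unfold Claim_equal_solution
  intro N K coord _ hpre
  unfold Spec_solution
  simp only [solution, solution_alt]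
  by_cases hKN : K ≥ N
  · rw [if_pos hKN, if_pos hKN]
  · rw [if_neg hKN, if_neg hKN]
    rw [PySem.List.foldl_append_singleton_eq_map, List.nil_append, pop_loop_eq_drop,
      PySem.List.length_pyRange_one, topSum_eq]
    set g := (PySem.List.pyRange 1 N 1).map
      (fun i => PySem.List.pyGetD coord i 0 - PySem.List.pyGetD coord (i - 1) 0) with hg
    have hsum : (PySem.List.sorted g (fun x => x) true).sum = g.sum :=
      (PySem.List.sorted_perm _ _ _).sum_eq
    have hsplit := List.sum_take_add_sum_drop (PySem.List.sorted g (fun x => x) true) (K - 1).toNat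
    have heq : (K - 1 - 0).toNat = (K - 1).toNat := by norm_num
    rw [heq]
    omega
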